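-- pv_equiv track=rewrite | github.com/davidtangGT/mofdscribe | src/mofdscribe/featurizers/utils/raspa/ff_builder.py | check_ff_list
-- ===== SOURCE A (Python) =====
-- from typing import List
--
-- def check_ff_list(inp_list: List[str]):
--     """Check a list of atom types.
--
--     1) Remove duplicates, preserving the order of the elements.
--     2) Warn if there are atom types with the same name but different parameters
--     3) If a shorter atom type comes later, swap the order # TODO!
--
--     Args:
--         inp_list (List[str]): list of atom types
--
--     Raises:
--         ValueError: If the list contains duplicate atom type with different parameters
--
--     Returns:
--         list[str]: list of atom types
--     """ """ """
--     out_list = []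
--     for item in inp_list:
--         if item.split()[0] not in [x.split()[0] for x in out_list]:  # atom type label is unique
--             out_list.append(item)
--         else:
--             if item in out_list:  # Two atom types are exactly the same
--                 pass
--             else:
--                 raise ValueError("Two atom types with same name but different parameters are used.")
--     return out_list
-- ===== SOURCE B (Python) =====
-- def check_ff_list(inp_list):
--     groups = {}
--     for item in inp_list:
--         groups.setdefault(item.split()[0], []).append(item)
--     out_list = []
--     for items in groups.values():
--         first = items[0]
--         for it in items:
--             if it != first:
--                 raise ValueError("Two atom types with same name but different parameters are used.")
--         out_list.append(first)
--     return out_list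
-- ===== Notes on version B (the rewrite author's own statement) =====
-- stated objective: alternative
-- what changed: A scans the growing output's labels on every item (quadratic membership test); B first builds a label->group dict in one pass, then emits each group's first element in a second pass over the groups.
import Mathlib
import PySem

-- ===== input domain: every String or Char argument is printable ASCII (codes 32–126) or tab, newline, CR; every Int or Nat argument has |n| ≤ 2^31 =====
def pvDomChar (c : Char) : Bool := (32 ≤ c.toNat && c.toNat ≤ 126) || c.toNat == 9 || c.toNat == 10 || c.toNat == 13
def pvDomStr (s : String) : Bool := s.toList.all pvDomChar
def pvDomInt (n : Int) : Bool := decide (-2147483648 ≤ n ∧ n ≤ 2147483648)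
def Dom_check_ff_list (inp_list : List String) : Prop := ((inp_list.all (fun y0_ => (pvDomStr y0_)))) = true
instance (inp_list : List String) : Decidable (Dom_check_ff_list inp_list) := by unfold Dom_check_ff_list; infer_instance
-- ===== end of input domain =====

-- B builds a label→group dict in one pass and emits each group's first element in a second pass,
-- replacing A's repeated membership scan over the growing output list (objective: alternative).


-- item.split()[0]; the '[0]' raises IndexError on a whitespace-only item, which Pre_ excludes,
-- so the default "" is never the value used on admitted inputs
def pvLab (s : String) : String := (PySem.Str.split₀ s).headD ""

-- ===== PORT A =====
def check_ff_list (inp_list : List String) : List String :=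
  inp_list.foldl (fun out_list item =>
    if pvLab item ∉ out_list.map pvLab then out_list ++ [item]
    else if item ∈ out_list then out_list   -- pass
    else out_list                            -- Python raises ValueError here; excluded by Pre_
    ) []

-- ===== PORT B =====
-- first loop builds groups (setdefault+append = modify with default []); second loop walks groups.items
def check_ff_list_alt (inp_list : List String) : List String :=
  (inp_list.foldl (fun d s => d.modify (pvLab s) [] (fun g => g ++ [s]))
      (PySem.Dict.empty : PySem.Dict String (List String))).items.foldl
    (fun out p =>
      if p.2.all (fun it => it == p.2.headD "") then out ++ [p.2.headD ""]  -- items[0] = headD; group nonempty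
      else out                               -- Python raises ValueError here; excluded by Pre_
      ) []

-- ===== PRECONDITION & SPEC =====
-- Pre_ excludes exactly the inputs where A raises: a whitespace-only item (IndexError from split()[0])
-- or two distinct items sharing a first token (ValueError).
def Pre_check_ff_list (inp_list : List String) : Prop :=
  (∀ s ∈ inp_list, PySem.Str.split₀ s ≠ []) ∧
  ∀ a ∈ inp_list, ∀ b ∈ inp_list, pvLab a = pvLab b → a = b
instance (inp_list : List String) : Decidable (Pre_check_ff_list inp_list) := by
  unfold Pre_check_ff_list; infer_instance
def pvWitness_check_ff_list : List String := ["C 1.0", "H 0.5", "C 1.0"]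

def Spec_check_ff_list (inp_list : List String) (out : List String) : Prop := out = check_ff_list_alt inp_list
instance (inp_list : List String) (out : List String) : Decidable (Spec_check_ff_list inp_list out) := by unfold Spec_check_ff_list; infer_instance

-- ===== CLAIM (what is proved, stated in full; the proofs are below) =====
def Claim_equal_check_ff_list : Prop := ∀ (inp_list : List String), Dom_check_ff_list inp_list → Pre_check_ff_list inp_list → Spec_check_ff_list inp_list (check_ff_list inp_list)

-- ===== LEMMAS AND PROOFS =====

lemma pvLab_mem_map {acc : List String} {x : String}
    (h : ∀ a ∈ acc, pvLab a = pvLab x → a = x) :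
    (pvLab x ∈ acc.map pvLab) ↔ x ∈ acc := by
  simp only [List.mem_map]
  constructor
  · rintro ⟨a, ha, hl⟩; exact (h a ha hl) ▸ ha
  · intro hx; exact ⟨x, hx, rfl⟩

lemma A_fold (l acc : List String)
    (hinj : ∀ a b, (a ∈ acc ∨ a ∈ l) → (b ∈ acc ∨ b ∈ l) → pvLab a = pvLab b → a = b) :
    l.foldl (fun out_list item =>
      if pvLab item ∉ out_list.map pvLab then out_list ++ [item]
      else if item ∈ out_list then out_list
      else out_list) acc = PySem.Set.update acc l := by
  induction l generalizing acc with
  | nil => simp [PySem.Set.update]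
  | cons x xs ih =>
    have hstep : (if pvLab x ∉ acc.map pvLab then acc ++ [x]
        else if x ∈ acc then acc else acc) = PySem.Set.add acc x := by
      have hiff : (pvLab x ∈ acc.map pvLab) ↔ x ∈ acc :=
        pvLab_mem_map (fun a ha => hinj a x (Or.inl ha) (Or.inr (by simp)))
      by_cases hx : x ∈ acc
      · simp [hiff, hx]
      · simp [hiff, hx]
    rw [List.foldl_cons, hstep, PySem.Set.update_cons]
    exact ih (PySem.Set.add acc x) (by
      intro a b ha hb
      apply hinj a b
      · rcases ha with h | h
        · rcases (PySem.Set.mem_add _ _ _).1 h with h' | h'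
          · exact Or.inl h'
          · exact Or.inr (by simp [h'])
        · exact Or.inr (by simp [h])
      · rcases hb with h | h
        · rcases (PySem.Set.mem_add _ _ _).1 h with h' | h'
          · exact Or.inl h'
          · exact Or.inr (by simp [h'])
        · exact Or.inr (by simp [h]))

lemma A_eq (l : List String)
    (hinj : ∀ a ∈ l, ∀ b ∈ l, pvLab a = pvLab b → a = b) :
    check_ff_list l = PySem.Set.ofList l := by
  have h0 : ∀ a b, (a ∈ ([] : List String) ∨ a ∈ l) → (b ∈ ([] : List String) ∨ b ∈ l) →
      pvLab a = pvLab b → a = b := by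
    intro a b ha hb
    simp only [List.not_mem_nil, false_or] at ha hb
    exact hinj a ha b hb
  unfold check_ff_list
  rw [A_fold l [] h0, PySem.Set.update_nil_left]

lemma setmap (l : List String)
    (hinj : ∀ a ∈ l, ∀ b ∈ l, pvLab a = pvLab b → a = b) :
    PySem.Set.ofList (l.map pvLab) = (PySem.Set.ofList l).map pvLab := by
  induction l using List.reverseRecOn with
  | nil => rfl
  | append_singleton xs x ih =>
    have hinj' : ∀ a ∈ xs, ∀ b ∈ xs, pvLab a = pvLab b → a = b := by
      intro a ha b hb; exact hinj a (by simp [ha]) b (by simp [hb])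
    rw [List.map_append, List.map_singleton, PySem.Set.ofList_append_singleton,
        PySem.Set.ofList_append_singleton, ih hinj']
    have hiff : (pvLab x ∈ (PySem.Set.ofList xs).map pvLab) ↔ x ∈ PySem.Set.ofList xs := by
      apply pvLab_mem_map
      intro a ha
      exact hinj a (by simp [(PySem.Set.mem_ofList _ _).1 ha]) x (by simp)
    by_cases hx : x ∈ PySem.Set.ofList xs
    · rw [PySem.Set.add_of_mem hx, PySem.Set.add_of_mem (hiff.2 hx)]
    · rw [PySem.Set.add_of_not_mem hx, PySem.Set.add_of_not_mem (fun h => hx (hiff.1 h)),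
          List.map_append, List.map_singleton]

lemma grp_headD (l : List String) (x : String) (hx : x ∈ l)
    (hinj : ∀ a ∈ l, pvLab a = pvLab x → a = x) :
    (l.filter (fun s => pvLab s == pvLab x)).headD "" = x ∧
    ∀ y ∈ l.filter (fun s => pvLab s == pvLab x), y = x := by
  have hmemf : ∀ y ∈ l.filter (fun s => pvLab s == pvLab x), y = x := by
    intro y hy
    have := List.mem_filter.1 hy
    exact hinj y this.1 (by simpa using this.2)
  refine ⟨?_, hmemf⟩
  have hxf : x ∈ l.filter (fun s => pvLab s == pvLab x) :=
    List.mem_filter.2 ⟨hx, by simp⟩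
  cases hf : l.filter (fun s => pvLab s == pvLab x) with
  | nil => rw [hf] at hxf; simp at hxf
  | cons y t => simpa using hmemf y (by rw [hf]; simp)

lemma B_eq (l : List String)
    (hinj : ∀ a ∈ l, ∀ b ∈ l, pvLab a = pvLab b → a = b) :
    check_ff_list_alt l = PySem.Set.ofList l := by
  have hkeys : (l.foldl (fun d s => d.modify (pvLab s) [] (fun g => g ++ [s]))
        (PySem.Dict.empty : PySem.Dict String (List String))).keys
      = PySem.Set.update (PySem.Dict.empty : PySem.Dict String (List String)).keys (l.map pvLab) :=
    PySem.Dict.keys_foldl_modify_key (l := l) (key := pvLab) (d0 := ([] : List String))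
      (f := fun _ s => fun g => g ++ [s]) (d := PySem.Dict.empty)
  have hnd : (l.foldl (fun d s => d.modify (pvLab s) [] (fun g => g ++ [s]))
        (PySem.Dict.empty : PySem.Dict String (List String))).keys.Nodup :=
    PySem.Dict.nodup_keys_foldl_modify_key (l := l) (key := pvLab) (d0 := ([] : List String))
      (f := fun _ s => fun g => g ++ [s]) (d := PySem.Dict.empty) PySem.Dict.nodup_keys_empty
  have hget : ∀ c, (l.foldl (fun d s => d.modify (pvLab s) [] (fun g => g ++ [s]))
        (PySem.Dict.empty : PySem.Dict String (List String))).getD c []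
      = l.filter (fun s => pvLab s == c) := by
    intro c
    have h1 : (l.foldl (fun d s => d.modify (pvLab s) [] (fun g => g ++ [s]))
          (PySem.Dict.empty : PySem.Dict String (List String)))
        = (l.map (fun s => (pvLab s, s))).foldl
            (fun d p => d.modify p.1 [] (fun g => g ++ [p.2])) PySem.Dict.empty := by
      rw [List.foldl_map]
    rw [h1, PySem.Dict.getD_foldl_modify_append]
    simp [List.filter_map, Function.comp_def]
  have key : ∀ x ∈ PySem.Set.ofList l,
      ((l.filter (fun s => pvLab s == pvLab x)).all
        (fun it => it == (l.filter (fun s => pvLab s == pvLab x)).headD "") = true)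
      ∧ (l.filter (fun s => pvLab s == pvLab x)).headD "" = x := by
    intro x hx
    have hxl : x ∈ l := (PySem.Set.mem_ofList _ _).1 hx
    obtain ⟨hh, hall⟩ := grp_headD l x hxl (fun a ha hl => hinj a ha x hxl hl)
    refine ⟨?_, hh⟩
    rw [hh]
    apply List.all_eq_true.2
    intro it hit
    simp [hall it hit]
  unfold check_ff_list_alt
  rw [PySem.Dict.items_eq_map_keys _ hnd ([] : List String)]
  have h2 : ((l.foldl (fun d s => d.modify (pvLab s) [] (fun g => g ++ [s]))
        (PySem.Dict.empty : PySem.Dict String (List String))).keys.map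
          (fun k => (k, (l.foldl (fun d s => d.modify (pvLab s) [] (fun g => g ++ [s]))
            (PySem.Dict.empty : PySem.Dict String (List String))).getD k []))).foldl
      (fun out p =>
        if p.2.all (fun it => it == p.2.headD "") then out ++ [p.2.headD ""] else out) []
    = (l.foldl (fun d s => d.modify (pvLab s) [] (fun g => g ++ [s]))
        (PySem.Dict.empty : PySem.Dict String (List String))).keys.foldl
      (fun out k =>
        if (l.filter (fun s => pvLab s == k)).all
            (fun it => it == (l.filter (fun s => pvLab s == k)).headD "")
        then out ++ [(l.filter (fun s => pvLab s == k)).headD ""] else out) [] := by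
    rw [List.foldl_map]
    congr 1
    funext out k
    simp only [hget k]
  rw [h2, hkeys]
  have h3 : PySem.Set.update (PySem.Dict.empty : PySem.Dict String (List String)).keys (l.map pvLab)
      = PySem.Set.ofList (l.map pvLab) := PySem.Set.update_nil_left _
  rw [h3]
  have h4 : (PySem.Set.ofList (l.map pvLab)).foldl
      (fun out k =>
        if (l.filter (fun s => pvLab s == k)).all
            (fun it => it == (l.filter (fun s => pvLab s == k)).headD "")
        then out ++ [(l.filter (fun s => pvLab s == k)).headD ""] else out) []
    = [] ++ ((PySem.Set.ofList (l.map pvLab)).filter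
        (fun k => (l.filter (fun s => pvLab s == k)).all
          (fun it => it == (l.filter (fun s => pvLab s == k)).headD ""))).map
        (fun k => (l.filter (fun s => pvLab s == k)).headD "") :=
    PySem.List.foldl_append_if
      (p := fun k => (l.filter (fun s => pvLab s == k)).all
        (fun it => it == (l.filter (fun s => pvLab s == k)).headD ""))
      (f := fun k => (l.filter (fun s => pvLab s == k)).headD "")
      (PySem.Set.ofList (l.map pvLab)) []
  rw [h4, List.nil_append, setmap l hinj, List.filter_map, List.map_map]
  have h5 : (PySem.Set.ofList l).filter
      ((fun k => (l.filter (fun s => pvLab s == k)).all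
        (fun it => it == (l.filter (fun s => pvLab s == k)).headD "")) ∘ pvLab)
      = PySem.Set.ofList l := by
    apply List.filter_eq_self.2
    intro x hx
    exact (key x hx).1
  rw [h5]
  have h6 : (PySem.Set.ofList l).map
      ((fun k => (l.filter (fun s => pvLab s == k)).headD "") ∘ pvLab)
      = (PySem.Set.ofList l).map id := by
    apply List.map_congr_left
    intro x hx
    exact (key x hx).2
  rw [h6, List.map_id]

-- ===== VERDICT (by name: the statement is the Claim_ definition above) =====
theorem check_ff_list_spec : Claim_equal_check_ff_list := by
  intro l _ hpre
  unfold Spec_check_ff_list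
  rw [A_eq l hpre.2, B_eq l hpre.2]
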